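-- pv_equiv track=rewrite | github.com/ElcaroNossam/elcarobybitbotv2 | webapp/services/indicators.py | fractal_indicator
-- ===== SOURCE A (Python) =====
-- from typing import List, Dict, Tuple, Optional, Any
--
-- def fractal_indicator(candles: List[Dict], period: int = 5) -> Tuple[List[bool], List[bool]]:
--     """Williams Fractal"""
--     half = period // 2
--     up_fractals = [False] * len(candles)
--     down_fractals = [False] * len(candles)
--
--     for i in range(half, len(candles) - half):
--         # Up fractal
--         is_up = True
--         for j in range(1, half + 1):
--             if candles[i]['high'] <= candles[i - j]['high'] or candles[i]['high'] <= candles[i + j]['high']: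
--                 is_up = False
--                 break
--         up_fractals[i] = is_up
--
--         # Down fractal
--         is_down = True
--         for j in range(1, half + 1):
--             if candles[i]['low'] >= candles[i - j]['low'] or candles[i]['low'] >= candles[i + j]['low']:
--                 is_down = False
--                 break
--         down_fractals[i] = is_down
--
--     return up_fractals, down_fractals
-- ===== SOURCE B (Python) =====
-- from typing import List, Dict, Tuple
--
-- def fractal_indicator(candles: List[Dict], period: int = 5) -> Tuple[List[bool], List[bool]]:
--     """Williams Fractal via monotonic-stack nearest-greater-or-equal distances."""
--     n = len(candles)
--     half = period // 2
--     if half <= 0: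
--         # no neighbours are required, so every candle is trivially a fractal
--         return [True] * n, [True] * n
--     if n <= 2 * half:
--         # no index has a full window on both sides
--         return [False] * n, [False] * n
--     highs = [c['high'] for c in candles]
--     neg_lows = [-c['low'] for c in candles]
--
--     def beats_left(vals):
--         # out[i] is True iff vals[j] < vals[i] for every j with i-half <= j < i
--         out = [False] * n
--         stack = []  # indices with no >= value between them and the cursor
--         for i, v in enumerate(vals):
--             while stack and vals[stack[-1]] < v:
--                 stack.pop()
--             out[i] = (not stack) or i - stack[-1] > half
--             stack.append(i)
--         return out
--
--     def fractals(vals):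
--         left = beats_left(vals)
--         right = beats_left(vals[::-1])[::-1]
--         return [l and r and half <= i < n - half
--                 for i, (l, r) in enumerate(zip(left, right))]
--
--     return fractals(highs), fractals(neg_lows)
-- ===== Notes on version B (the rewrite author's own statement) =====
-- stated objective: alternative
-- what changed: Replaces the nested per-candidate neighbour scan with one monotonic-stack pass per direction that finds the nearest greater-or-equal (resp. less-or-equal) neighbour and tests it by a distance comparison, eliminating the inner loop.
import Mathlib
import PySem

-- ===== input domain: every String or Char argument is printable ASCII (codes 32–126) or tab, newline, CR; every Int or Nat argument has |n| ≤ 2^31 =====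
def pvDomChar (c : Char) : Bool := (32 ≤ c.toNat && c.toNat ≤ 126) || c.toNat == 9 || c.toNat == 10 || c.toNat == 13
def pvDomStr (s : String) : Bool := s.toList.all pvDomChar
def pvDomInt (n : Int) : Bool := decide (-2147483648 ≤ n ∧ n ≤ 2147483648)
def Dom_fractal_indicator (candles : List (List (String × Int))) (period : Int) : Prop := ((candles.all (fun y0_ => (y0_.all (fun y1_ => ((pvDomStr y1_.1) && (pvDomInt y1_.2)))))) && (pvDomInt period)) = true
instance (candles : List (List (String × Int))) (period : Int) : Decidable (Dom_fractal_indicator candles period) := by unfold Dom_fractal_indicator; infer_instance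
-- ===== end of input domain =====

-- B replaces A's nested per-candidate neighbour scan with one monotonic-stack pass per
-- direction (nearest greater-or-equal / less-or-equal neighbour), removing the inner loop.

-- ===== PORT A =====
-- candles[i][key]: key lookup is first-match; Pre_ guarantees the key is present wherever
-- the Python reads it, outside Pre_ the total form defaults to 0
def pvField (candles : List (List (String × Int))) (i : Int) (k : String) : Int :=
  PySem.Dict.getD ⟨(PySem.List.pyGet? candles i).getD []⟩ k 0

def fractal_indicator (candles : List (List (String × Int))) (period : Int) : List Bool × List Bool :=
  let half := PySem.Int.floordiv period 2
  let up := List.replicate candles.length false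
  let down := List.replicate candles.length false
  (PySem.List.pyRange half ((candles.length : Int) - half) 1).foldl
    (fun (st : List Bool × List Bool) i =>
      -- each inner 'for j … break' loop is the short-circuit all over range(1, half+1)
      let isUp := (PySem.List.pyRange 1 (half + 1) 1).all (fun j =>
        !(decide (pvField candles i "high" ≤ pvField candles (i - j) "high") ||
          decide (pvField candles i "high" ≤ pvField candles (i + j) "high")))
      let isDown := (PySem.List.pyRange 1 (half + 1) 1).all (fun j =>
        !(decide (pvField candles i "low" ≥ pvField candles (i - j) "low") ||
          decide (pvField candles i "low" ≥ pvField candles (i + j) "low")))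
      (PySem.List.pySetD st.1 i isUp, PySem.List.pySetD st.2 i isDown))
    (up, down)

-- ===== PORT B =====
-- 'while stack and vals[stack[-1]] < v: stack.pop()'
def pvPop (vals : List Int) (v : Int) : List Int → List Int
  | [] => []
  | s :: rest => if PySem.List.pyGetD vals s 0 < v then pvPop vals v rest else s :: rest

-- Source B's beats_left: out[i] ⟺ every j with i-half ≤ j < i has vals[j] < vals[i]
def pvBeatsLeft (vals : List Int) (half : Int) : List Bool :=
  ((PySem.List.enumerate vals 0).foldl
    (fun (st : List Bool × List Int) p =>
      let stack := pvPop vals p.2 st.2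
      (st.1 ++ [stack.isEmpty || decide (p.1 - stack.headD 0 > half)], p.1 :: stack))
    ([], [])).1

-- Source B's fractals
def pvFractals (vals : List Int) (half n : Int) : List Bool :=
  let left := pvBeatsLeft vals half
  let right := (pvBeatsLeft vals.reverse half).reverse
  (PySem.List.enumerate (left.zip right) 0).map
    (fun p => p.2.1 && p.2.2 && decide (half ≤ p.1) && decide (p.1 < n - half))

def fractal_indicator_alt (candles : List (List (String × Int))) (period : Int) : List Bool × List Bool :=
  let n := candles.length
  let half := PySem.Int.floordiv period 2
  if half ≤ 0 then (List.replicate n true, List.replicate n true)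
  else if (n : Int) ≤ 2 * half then (List.replicate n false, List.replicate n false)
  else
    let highs := candles.map (fun c => PySem.Dict.getD ⟨c⟩ "high" 0)
    let negLows := candles.map (fun c => -(PySem.Dict.getD ⟨c⟩ "low" 0))
    (pvFractals highs half (n : Int), pvFractals negLows half (n : Int))

-- ===== PRECONDITION & SPEC =====
-- Pre_ excludes (a) negative periods, on which the Python A always raises IndexError, and
-- (b) inputs whose fractal window is nonempty but some candle lacks a 'high' or 'low' key:
-- there A normally raises KeyError, though it can still return when a short-circuited
-- comparison breaks out of the scan before reading the malformed candle (see cites);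
-- B raises KeyError on those inputs.
def Pre_fractal_indicator (candles : List (List (String × Int))) (period : Int) : Prop :=
  0 ≤ period ∧
  (2 ≤ period → 2 * PySem.Int.floordiv period 2 < (candles.length : Int) →
    ∀ c ∈ candles, (PySem.Dict.get? (⟨c⟩ : PySem.Dict String Int) "high").isSome = true ∧
                   (PySem.Dict.get? (⟨c⟩ : PySem.Dict String Int) "low").isSome = true)
instance (candles : List (List (String × Int))) (period : Int) : Decidable (Pre_fractal_indicator candles period) := by unfold Pre_fractal_indicator; infer_instance

def pvWitness_fractal_indicator : (List (List (String × Int))) × Int :=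
  ([[("high", 5), ("low", 1)], [("high", 9), ("low", 0)], [("high", 5), ("low", 1)]], 2)

def Spec_fractal_indicator (candles : List (List (String × Int))) (period : Int) (out : List Bool × List Bool) : Prop := out = fractal_indicator_alt candles period
instance (candles : List (List (String × Int))) (period : Int) (out : List Bool × List Bool) : Decidable (Spec_fractal_indicator candles period out) := by unfold Spec_fractal_indicator; infer_instance

-- ===== CLAIM (what is proved, stated in full; the proofs are below) =====
def Claim_equal_fractal_indicator : Prop := ∀ (candles : List (List (String × Int))) (period : Int), Dom_fractal_indicator candles period → Pre_fractal_indicator candles period → Spec_fractal_indicator candles period (fractal_indicator candles period)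

-- ===== LEMMAS AND PROOFS =====
def pvVal (vals : List Int) (j : Nat) : Int := vals.getD j 0

theorem pvPop_filter (vals : List Int) (v : Int) (l : List Nat)
    (hmono : l.Pairwise (fun a b => pvVal vals a ≤ pvVal vals b)) :
    pvPop vals v (l.map (fun j : Nat => (j : Int))) =
      (l.filter (fun j => decide (v ≤ pvVal vals j))).map (fun j : Nat => (j : Int)) := by
  induction l with
  | nil => rfl
  | cons j rest ih =>
    rcases List.pairwise_cons.mp hmono with ⟨hj, htail⟩
    by_cases h : pvVal vals j < v
    · rw [List.map_cons, pvPop, PySem.List.pyGetD_natCast, if_pos (show vals.getD j 0 < v from h), ih htail]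
      have hd : (decide (v ≤ pvVal vals j)) = false := by simp; omega
      simp [hd]
    · rw [List.map_cons, pvPop, PySem.List.pyGetD_natCast, if_neg (show ¬ vals.getD j 0 < v from h)]
      have hv : v ≤ pvVal vals j := by omega
      rw [List.filter_cons_of_pos (by simpa using hv)]
      have : rest.filter (fun j => decide (v ≤ pvVal vals j)) = rest := by
        apply List.filter_eq_self.mpr
        intro a ha; have := hj a ha; simp; omega
      rw [this, List.map_cons]

def pvCandB (vals : List Int) (m j : Nat) : Bool :=
  decide (∀ k, k < m → j < k → pvVal vals k ≤ pvVal vals j)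

def pvSS (vals : List Int) (m : Nat) : List Nat :=
  ((List.range m).filter (pvCandB vals m)).reverse

theorem pvSS_mono (vals : List Int) (m : Nat) :
    (pvSS vals m).Pairwise (fun a b => pvVal vals a ≤ pvVal vals b) := by
  have h1 : (pvSS vals m).Pairwise (fun a b => b < a) := by
    unfold pvSS
    rw [List.pairwise_reverse]
    exact List.Pairwise.filter _ List.pairwise_lt_range
  apply h1.imp_of_mem
  intro a b ha hb hba
  have ha' : a ∈ (List.range m).filter (pvCandB vals m) := by
    have := ha; unfold pvSS at this; exact List.mem_reverse.mp this
  have hb' : b ∈ (List.range m).filter (pvCandB vals m) := by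
    have := hb; unfold pvSS at this; exact List.mem_reverse.mp this
  rcases List.mem_filter.mp ha' with ⟨ham, hacand⟩
  rcases List.mem_filter.mp hb' with ⟨hbm, hbcand⟩
  have hcand : ∀ k, k < m → b < k → pvVal vals k ≤ pvVal vals b := of_decide_eq_true hbcand
  exact hcand a (List.mem_range.mp ham) hba

theorem pvSS_succ (vals : List Int) (m : Nat) :
    pvSS vals (m + 1) =
      m :: (pvSS vals m).filter (fun j => decide (pvVal vals m ≤ pvVal vals j)) := by
  unfold pvSS
  rw [List.range_succ, List.filter_append]
  have hm : pvCandB vals (m + 1) m = true := by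
    apply decide_eq_true; intro k hk hmk; omega
  rw [List.filter_singleton]
  rw [hm, cond_true, List.reverse_append, List.reverse_singleton]
  have hcong : (List.range m).filter (pvCandB vals (m + 1)) =
      (List.range m).filter (fun j => pvCandB vals m j && decide (pvVal vals m ≤ pvVal vals j)) := by
    apply List.filter_congr
    intro j hj
    have hjm : j < m := List.mem_range.mp hj
    by_cases hc : (∀ k, k < m + 1 → j < k → pvVal vals k ≤ pvVal vals j)
    · have h1 : pvCandB vals (m+1) j = true := decide_eq_true hc
      have h2 : pvCandB vals m j = true := by
        apply decide_eq_true; intro k hk hjk; exact hc k (by omega) hjk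
      have h3 : decide (pvVal vals m ≤ pvVal vals j) = true := by
        simp; exact hc m (by omega) hjm
      simp [h1, h2, h3]
    · have h1 : pvCandB vals (m+1) j = false := decide_eq_false hc
      rw [h1]
      by_cases h2 : pvCandB vals m j = true
      · have hc2 := of_decide_eq_true h2
        have h3 : ¬ (pvVal vals m ≤ pvVal vals j) := by
          intro hle; apply hc; intro k hk hjk
          rcases Nat.lt_succ_iff_lt_or_eq.mp hk with h | h
          · exact hc2 k h hjk
          · subst h; exact hle
        simp [h2, h3]
      · simp [eq_false_of_ne_true h2]
  rw [hcong, ← List.filter_filter, List.filter_reverse]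
  simp [Bool.and_comm]

def pvOkL (vals : List Int) (half : Int) (i : Nat) : Bool :=
  decide (∀ j, j < i → (i : Int) - (j : Int) ≤ half → pvVal vals j < pvVal vals i)

theorem pvHead_max (l : List Nat) (p : Nat) (hd : l.Pairwise (fun a b => b < a))
    (hp : p ∈ l) (hmax : ∀ x ∈ l, x ≤ p) : l.head? = some p := by
  cases l with
  | nil => cases hp
  | cons h t =>
    rcases List.mem_cons.mp hp with rfl | hpt
    · rfl
    · have := (List.pairwise_cons.mp hd).1 p hpt
      have := hmax h (by simp)
      omega

theorem pvEntry_eq (vals : List Int) (half : Int) (m : Nat) :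
    ((((pvSS vals m).filter (fun j => decide (pvVal vals m ≤ pvVal vals j))).map
        (fun j : Nat => (j : Int))).isEmpty
      || decide ((m : Int) -
          (((pvSS vals m).filter (fun j => decide (pvVal vals m ≤ pvVal vals j))).map
            (fun j : Nat => (j : Int))).headD 0 > half))
      = pvOkL vals half m := by
  set F := (pvSS vals m).filter (fun j => decide (pvVal vals m ≤ pvVal vals j)) with hF
  have hmemSS : ∀ x ∈ pvSS vals m, x < m := by
    intro x hx
    unfold pvSS at hx
    have := List.mem_reverse.mp hx
    exact List.mem_range.mp (List.mem_filter.mp this).1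
  by_cases hex : ∃ j, j < m ∧ pvVal vals m ≤ pvVal vals j
  · obtain ⟨j0, hj0m, hj0⟩ := hex
    have hm0 : 0 < m := by omega
    set P := fun j => pvVal vals m ≤ pvVal vals j with hP
    set p := Nat.findGreatest P (m - 1) with hp
    have hPp : P p := Nat.findGreatest_spec (m := j0) (by omega) hj0
    have hpm : p < m := by
      have := Nat.findGreatest_le (P := P) (m - 1)
      omega
    have hmax : ∀ k, k < m → P k → k ≤ p := by
      intro k hk hPk
      exact Nat.le_findGreatest (by omega) hPk
    have hpF : p ∈ F := by
      rw [hF]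
      apply List.mem_filter.mpr
      refine ⟨?_, by simpa using hPp⟩
      unfold pvSS
      apply List.mem_reverse.mpr
      apply List.mem_filter.mpr
      refine ⟨List.mem_range.mpr hpm, ?_⟩
      apply decide_eq_true
      intro k hk hpk
      by_cases hPk : P k
      · exact absurd (hmax k hk hPk) (by omega)
      · have : pvVal vals k < pvVal vals m := by simp [hP] at hPk; omega
        have := hPp
        simp [hP] at this
        omega
    have hmaxF : ∀ x ∈ F, x ≤ p := by
      intro x hx
      rw [hF] at hx
      rcases List.mem_filter.mp hx with ⟨hxss, hxp⟩
      exact hmax x (hmemSS x hxss) (by simpa [hP] using hxp)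
    have hdF : F.Pairwise (fun a b => b < a) := by
      rw [hF]
      apply List.Pairwise.filter
      unfold pvSS
      rw [List.pairwise_reverse]
      exact List.Pairwise.filter _ List.pairwise_lt_range
    have hhead : F.head? = some p := pvHead_max F p hdF hpF hmaxF
    have hne : F ≠ [] := by intro h; rw [h] at hhead; cases hhead
    have h1 : (F.map (fun j : Nat => (j : Int))).isEmpty = false := by
      simp [List.isEmpty_eq_false_iff, hne]
    have h2 : (F.map (fun j : Nat => (j : Int))).headD 0 = (p : Int) := by
      rw [List.headD_eq_head?_getD, List.head?_map, hhead]
      rfl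
    rw [h1, h2, Bool.false_or]
    unfold pvOkL
    apply decide_eq_decide.mpr
    constructor
    · intro hgt j hj hle
      by_contra hnot
      have hPj : P j := by simp [hP]; omega
      have := hmax j hj hPj
      have : ((j : Int)) ≤ (p : Int) := by exact_mod_cast this
      omega
    · intro hall
      by_contra hle
      have := hall p hpm (by omega)
      have := hPp
      simp [hP] at this
      omega
  · have hFnil : F = [] := by
      rw [hF]
      apply List.filter_eq_nil_iff.mpr
      intro a ha
      simp only [decide_eq_true_eq]
      intro hle
      exact hex ⟨a, hmemSS a ha, hle⟩
    rw [hFnil]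
    simp only [List.map_nil, List.isEmpty_nil, Bool.true_or]
    symm
    apply decide_eq_true
    intro j hj _
    by_contra hnot
    exact hex ⟨j, hj, by omega⟩

theorem pvLoop_inv (vals : List Int) (half : Int) (m : Nat) (hm : m ≤ vals.length) :
    ((PySem.List.enumerate vals 0).take m).foldl
      (fun (st : List Bool × List Int) p =>
        let stack := pvPop vals p.2 st.2
        (st.1 ++ [stack.isEmpty || decide (p.1 - stack.headD 0 > half)], p.1 :: stack))
      ([], [])
    = ((List.range m).map (pvOkL vals half), (pvSS vals m).map (fun j : Nat => (j : Int))) := by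
  induction m with
  | zero => simp [pvSS]
  | succ m ih =>
    have hm' : m < vals.length := by omega
    have htake : (PySem.List.enumerate vals 0).take (m + 1)
        = (PySem.List.enumerate vals 0).take m ++ [((m : Int), vals[m])] := by
      rw [List.take_add_one]
      congr 1
      rw [PySem.List.getElem?_enumerate]
      simp [hm']
    rw [htake, List.foldl_append, ih (by omega)]
    simp only [List.foldl_cons, List.foldl_nil]
    have hv : vals[m] = pvVal vals m := by
      simp [pvVal, List.getD_eq_getElem?_getD, hm']
    have hstack : pvPop vals vals[m] ((pvSS vals m).map (fun j : Nat => (j : Int)))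
        = ((pvSS vals m).filter (fun j => decide (pvVal vals m ≤ pvVal vals j))).map
            (fun j : Nat => (j : Int)) := by
      rw [hv, pvPop_filter vals _ _ (pvSS_mono vals m)]
    rw [Prod.mk.injEq]
    refine ⟨?_, ?_⟩
    · rw [hstack, List.range_succ, List.map_append, List.map_singleton]
      congr 1
      rw [← pvEntry_eq vals half m, hv]
    · rw [hstack, pvSS_succ, List.map_cons]

theorem pvBeatsLeft_eq (vals : List Int) (half : Int) :
    pvBeatsLeft vals half = (List.range vals.length).map (pvOkL vals half) := by
  unfold pvBeatsLeft
  have h := pvLoop_inv vals half vals.length (le_refl _)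
  rw [show (PySem.List.enumerate vals 0).take vals.length = PySem.List.enumerate vals 0 by
        apply List.take_of_length_le
        simp [PySem.List.length_enumerate]] at h
  rw [h]

def pvOkR (vals : List Int) (half : Int) (i : Nat) : Bool :=
  decide (∀ j, j < vals.length → i < j → (j : Int) - (i : Int) ≤ half → pvVal vals j < pvVal vals i)

theorem pvOkL_reverse (vals : List Int) (half : Int) (i : Nat) (hi : i < vals.length) :
    pvOkL vals.reverse half (vals.length - 1 - i) = pvOkR vals half i := by
  have hval : ∀ j, j < vals.length → pvVal vals.reverse j = pvVal vals (vals.length - 1 - j) := by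
    intro j hj
    simp [pvVal, List.getD_eq_getElem?_getD, hj,
      show vals.length - 1 - j < vals.length by omega]
  unfold pvOkL pvOkR
  apply decide_eq_decide.mpr
  constructor
  · intro h j hj hij hle
    have h1 := h (vals.length - 1 - j) (by omega)
      (by omega)
    rw [hval _ (by omega), hval _ (by omega)] at h1
    rw [show vals.length - 1 - (vals.length - 1 - j) = j by omega,
        show vals.length - 1 - (vals.length - 1 - i) = i by omega] at h1
    exact h1
  · intro h j hj hle
    have hjlen : j < vals.length := by omega
    have h1 := h (vals.length - 1 - j) (by omega) (by omega)
      (by omega)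
    rw [hval _ hjlen, hval _ (by omega)] at *
    rw [show vals.length - 1 - (vals.length - 1 - i) = i by omega]
    exact h1

theorem pvFractals_eq (vals : List Int) (half : Int) :
    pvFractals vals half (vals.length : Int) =
      (List.range vals.length).map (fun i =>
        pvOkL vals half i && pvOkR vals half i &&
        decide (half ≤ (i : Int)) && decide ((i : Int) < (vals.length : Int) - half)) := by
  unfold pvFractals
  rw [pvBeatsLeft_eq, pvBeatsLeft_eq]
  apply List.ext_getElem
  · simp [PySem.List.length_enumerate]
  · intro k h1 h2
    have hk : k < vals.length := by simpa using h2
    have hzip : ∀ (hh : k < ((((List.range vals.length).map (pvOkL vals half))).zip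
        (((List.range vals.reverse.length).map (pvOkL vals.reverse half)).reverse)).length),
        ((((List.range vals.length).map (pvOkL vals half))).zip
        (((List.range vals.reverse.length).map (pvOkL vals.reverse half)).reverse))[k] =
        (pvOkL vals half k, pvOkR vals half k) := by
      intro hh
      rw [List.getElem_zip]
      congr 1
      · simp
      · rw [List.getElem_reverse]
        simp only [List.length_map, List.length_range, List.length_reverse] at *
        rw [List.getElem_map]
        simp only [List.getElem_range]
        exact pvOkL_reverse vals half k hk
    rw [List.getElem_map, PySem.List.getElem_enumerate, hzip]
    simp

theorem pvField_val (candles : List (List (String × Int))) (k : String) (t : Int)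
    (h0 : 0 ≤ t) (h1 : t < (candles.length : Int)) :
    pvField candles t k = pvVal (candles.map (fun c => PySem.Dict.getD ⟨c⟩ k 0)) t.toNat := by
  have ht : t.toNat < candles.length := by omega
  unfold pvField pvVal
  simp [PySem.List.pyGet?, PySem.List.pyIdx?, h0, h1, ht, List.getD_eq_getElem?_getD]

theorem pvField_val_neg (candles : List (List (String × Int))) (t : Int)
    (h0 : 0 ≤ t) (h1 : t < (candles.length : Int)) :
    pvField candles t "low" = - pvVal (candles.map (fun c => -(PySem.Dict.getD ⟨c⟩ "low" 0))) t.toNat := by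
  have ht : t.toNat < candles.length := by omega
  unfold pvField pvVal
  simp [PySem.List.pyGet?, PySem.List.pyIdx?, h0, h1, ht, List.getD_eq_getElem?_getD]

def pvUpA (candles : List (List (String × Int))) (half i : Int) : Bool :=
  (PySem.List.pyRange 1 (half + 1) 1).all (fun j =>
    !(decide (pvField candles i "high" ≤ pvField candles (i - j) "high") ||
      decide (pvField candles i "high" ≤ pvField candles (i + j) "high")))

def pvDownA (candles : List (List (String × Int))) (half i : Int) : Bool :=
  (PySem.List.pyRange 1 (half + 1) 1).all (fun j =>
    !(decide (pvField candles i "low" ≥ pvField candles (i - j) "low") ||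
      decide (pvField candles i "low" ≥ pvField candles (i + j) "low")))

theorem pvUpA_eq (candles : List (List (String × Int))) (half : Int) (i : Nat)
    (hi : half ≤ (i : Int)) (hi2 : (i : Int) < (candles.length : Int) - half) :
    pvUpA candles half (i : Int) =
      (pvOkL (candles.map (fun c => PySem.Dict.getD ⟨c⟩ "high" 0)) half i &&
       pvOkR (candles.map (fun c => PySem.Dict.getD ⟨c⟩ "high" 0)) half i) := by
  set highs := candles.map (fun c => PySem.Dict.getD ⟨c⟩ "high" 0) with hh
  have hlen : highs.length = candles.length := by simp [hh]
  have hfv : ∀ t : Int, 0 ≤ t → t < (candles.length : Int) →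
      pvField candles t "high" = pvVal highs t.toNat := fun t a b => pvField_val candles "high" t a b
  rw [Bool.eq_iff_iff]
  unfold pvUpA
  simp only [List.all_eq_true, PySem.List.mem_pyRange_one, Bool.and_eq_true]
  constructor
  · intro h
    constructor
    · apply decide_eq_true
      intro j hj hjle
      have h1 := h ((i : Int) - (j : Int)) ⟨by omega, by omega⟩
      rw [show (i:Int) - ((i:Int) - (j:Int)) = (j:Int) by ring] at h1
      simp only [Bool.not_or, Bool.and_eq_true, Bool.not_eq_true', decide_eq_false_iff_not, not_le] at h1
      have := h1.1
      rw [hfv (j:Int) (by omega) (by omega), hfv (i:Int) (by omega) (by omega)] at this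
      simpa using this
    · apply decide_eq_true
      intro j hjlen hj hjle
      have h1 := h ((j : Int) - (i : Int)) ⟨by omega, by omega⟩
      simp only [Bool.not_or, Bool.and_eq_true, Bool.not_eq_true', decide_eq_false_iff_not, not_le] at h1
      have := h1.2
      rw [show (i:Int) + ((j:Int) - (i:Int)) = (j:Int) by ring] at this
      rw [hfv (i:Int) (by omega) (by omega), hfv (j:Int) (by omega) (by omega)] at this
      simpa using this
  · rintro ⟨hL, hR⟩
    have hL' := of_decide_eq_true hL
    have hR' := of_decide_eq_true hR
    rintro j ⟨hj1, hj2⟩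
    simp only [Bool.not_or, Bool.and_eq_true, Bool.not_eq_true', decide_eq_false_iff_not, not_le]
    constructor
    · have h1 := hL' ((i:Int) - j).toNat (by omega) (by omega)
      rw [hfv (i:Int) (by omega) (by omega), hfv ((i:Int) - j) (by omega) (by omega)]
      rw [show ((i:Int)).toNat = i by omega]
      exact h1
    · have h1 := hR' ((i:Int) + j).toNat (by rw [hlen]; omega) (by omega) (by omega)
      rw [hfv (i:Int) (by omega) (by omega), hfv ((i:Int) + j) (by omega) (by omega)]
      rw [show ((i:Int)).toNat = i by omega]
      exact h1

theorem pvDownA_eq (candles : List (List (String × Int))) (half : Int) (i : Nat)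
    (hi : half ≤ (i : Int)) (hi2 : (i : Int) < (candles.length : Int) - half) :
    pvDownA candles half (i : Int) =
      (pvOkL (candles.map (fun c => -(PySem.Dict.getD ⟨c⟩ "low" 0))) half i &&
       pvOkR (candles.map (fun c => -(PySem.Dict.getD ⟨c⟩ "low" 0))) half i) := by
  set lows := candles.map (fun c => -(PySem.Dict.getD ⟨c⟩ "low" 0)) with hh
  have hlen : lows.length = candles.length := by simp [hh]
  have hfv : ∀ t : Int, 0 ≤ t → t < (candles.length : Int) →
      pvField candles t "low" = - pvVal lows t.toNat := fun t a b => pvField_val_neg candles t a b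
  rw [Bool.eq_iff_iff]
  unfold pvDownA
  simp only [List.all_eq_true, PySem.List.mem_pyRange_one, Bool.and_eq_true]
  constructor
  · intro h
    constructor
    · apply decide_eq_true
      intro j hj hjle
      have h1 := h ((i : Int) - (j : Int)) ⟨by omega, by omega⟩
      rw [show (i:Int) - ((i:Int) - (j:Int)) = (j:Int) by ring] at h1
      simp only [Bool.not_or, Bool.and_eq_true, Bool.not_eq_true', decide_eq_false_iff_not,
        ge_iff_le, not_le] at h1
      have := h1.1
      rw [hfv (j:Int) (by omega) (by omega), hfv (i:Int) (by omega) (by omega)] at this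
      simp at this
      simp
      omega
    · apply decide_eq_true
      intro j hjlen hj hjle
      have h1 := h ((j : Int) - (i : Int)) ⟨by omega, by omega⟩
      simp only [Bool.not_or, Bool.and_eq_true, Bool.not_eq_true', decide_eq_false_iff_not,
        ge_iff_le, not_le] at h1
      have := h1.2
      rw [show (i:Int) + ((j:Int) - (i:Int)) = (j:Int) by ring] at this
      rw [hfv (i:Int) (by omega) (by omega), hfv (j:Int) (by omega) (by omega)] at this
      simp at this
      omega
  · rintro ⟨hL, hR⟩
    have hL' := of_decide_eq_true hL
    have hR' := of_decide_eq_true hR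
    rintro j ⟨hj1, hj2⟩
    simp only [Bool.not_or, Bool.and_eq_true, Bool.not_eq_true', decide_eq_false_iff_not,
      ge_iff_le, not_le]
    constructor
    · have h1 := hL' ((i:Int) - j).toNat (by omega) (by omega)
      rw [hfv (i:Int) (by omega) (by omega), hfv ((i:Int) - j) (by omega) (by omega)]
      simp at h1 ⊢
      omega
    · have h1 := hR' ((i:Int) + j).toNat (by rw [hlen]; omega) (by omega) (by omega)
      rw [hfv (i:Int) (by omega) (by omega), hfv ((i:Int) + j) (by omega) (by omega)]
      simp at h1 ⊢
      omega

theorem pvMapRangeSet (n k : Nat) (f : Nat → Bool) (v : Bool) (hk : k < n) :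
    ((List.range n).map f).set k v = (List.range n).map (fun i => if i = k then v else f i) := by
  apply List.ext_getElem
  · simp
  · intro m h1 h2
    simp only [List.length_map, List.length_range] at h2
    rw [List.getElem_set]
    by_cases hmk : m = k
    · subst hmk; simp
    · simp [hmk]
      intro h
      exact (hmk h.symm).elim

theorem pvAFold (n : Nat) (half : Int) (h0 : 0 ≤ half) (fup fdown : Int → Bool) (k : Nat)
    (hk : half + (k : Int) ≤ (n : Int) - half) :
    (PySem.List.pyRange half (half + (k : Int)) 1).foldl
      (fun (st : List Bool × List Bool) i =>
        (PySem.List.pySetD st.1 i (fup i), PySem.List.pySetD st.2 i (fdown i)))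
      (List.replicate n false, List.replicate n false)
    = ((List.range n).map (fun (i : Nat) => if half ≤ (i : Int) ∧ (i : Int) < half + (k : Int) then fup (i : Int) else false),
       (List.range n).map (fun (i : Nat) => if half ≤ (i : Int) ∧ (i : Int) < half + (k : Int) then fdown (i : Int) else false)) := by
  induction k with
  | zero =>
    rw [show half + ((0 : Nat) : Int) = half by simp, PySem.List.pyRange_one_eq_nil (le_refl half)]
    simp only [List.foldl_nil]
    rw [Prod.mk.injEq]
    constructor <;>
    · rw [show (List.replicate n false) = (List.range n).map (fun _ => false) by
          simp [List.map_const']]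
      apply List.map_congr_left
      intro i _
      rw [if_neg (by omega)]
  | succ k ih =>
    have hk' : half + (k : Int) ≤ (n : Int) - half := by push_cast at hk ⊢; omega
    have hstep : half + ((k + 1 : Nat) : Int) = (half + (k : Int)) + 1 := by push_cast; ring
    rw [hstep, PySem.List.pyRange_one_succ_right (by omega), List.foldl_append, ih hk']
    simp only [List.foldl_cons, List.foldl_nil]
    have hidx : ((half + (k : Int))).toNat < n := by omega
    have hcast : (((half + (k : Int)).toNat : Int)) = half + (k : Int) := by omega
    rw [Prod.mk.injEq]
    constructor <;>
    · rw [PySem.List.pySetD_of_nonneg _ _ (show (0:Int) ≤ half + (k:Int) by omega), pvMapRangeSet _ _ _ _ hidx]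
      apply List.map_congr_left
      intro i hi
      by_cases hik : i = (half + (k : Int)).toNat
      · subst hik
        rw [if_pos rfl, if_pos (by omega), hcast]
      · rw [if_neg hik]
        by_cases hc : half ≤ (i : Int) ∧ (i : Int) < half + (k : Int)
        · rw [if_pos hc, if_pos ⟨hc.1, by omega⟩]
        · rw [if_neg hc, if_neg (by omega)]

theorem pvMain (candles : List (List (String × Int))) (period : Int) (hp : 0 ≤ period) :
    fractal_indicator candles period = fractal_indicator_alt candles period := by
  set half := PySem.Int.floordiv period 2 with hhalf
  have h0 : 0 ≤ half := by
    rw [hhalf, PySem.Int.floordiv_eq_ediv_of_pos (by norm_num)]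
    exact Int.ediv_nonneg hp (by norm_num)
  have hA : fractal_indicator candles period =
      (PySem.List.pyRange half ((candles.length : Int) - half) 1).foldl
        (fun (st : List Bool × List Bool) i =>
          (PySem.List.pySetD st.1 i (pvUpA candles half i),
           PySem.List.pySetD st.2 i (pvDownA candles half i)))
        (List.replicate candles.length false, List.replicate candles.length false) := rfl
  by_cases hz : half ≤ 0
  · -- half = 0: every index of the (full) window passes vacuously
    have h00 : half = 0 := le_antisymm hz h0
    have hk : half + (candles.length : Int) ≤ (candles.length : Int) - half := by omega
    rw [hA, show ((candles.length : Int) - half) = half + ((candles.length : Nat) : Int) by omega,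
        pvAFold candles.length half h0 _ _ candles.length hk]
    unfold fractal_indicator_alt
    rw [if_pos hz]
    rw [Prod.mk.injEq]
    constructor <;>
    · rw [show (List.replicate candles.length true) = (List.range candles.length).map (fun _ => true) by
          simp [List.map_const']]
      apply List.map_congr_left
      intro i hi
      have hi' : i < candles.length := List.mem_range.mp hi
      rw [if_pos (by omega)]
      first
        | (unfold pvUpA
           rw [show half + 1 = 1 by omega, PySem.List.pyRange_one_eq_nil (le_refl 1)]
           rfl)
        | (unfold pvDownA
           rw [show half + 1 = 1 by omega, PySem.List.pyRange_one_eq_nil (le_refl 1)]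
           rfl)
  · have h1 : 1 ≤ half := by omega
    by_cases hsm : (candles.length : Int) ≤ 2 * half
    · -- no index has a full window: the range is empty on both sides
      rw [hA, PySem.List.pyRange_one_eq_nil (by omega), List.foldl_nil]
      unfold fractal_indicator_alt
      rw [if_neg hz, if_pos hsm]
    · -- main case
      have hkeq : half + (((candles.length : Int) - 2 * half).toNat : Int) = (candles.length : Int) - half := by omega
      rw [hA, ← hkeq, pvAFold candles.length half h0 _ _ _ (le_of_eq hkeq)]
      unfold fractal_indicator_alt
      rw [if_neg hz, if_neg hsm]
      have hlenh : (candles.map (fun c => PySem.Dict.getD ⟨c⟩ "high" 0)).length = candles.length := by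
        simp only [List.length_map]
      have hlenl : (candles.map (fun c => -(PySem.Dict.getD ⟨c⟩ "low" 0))).length = candles.length := by
        simp only [List.length_map]
      rw [Prod.mk.injEq]
      constructor
      · rw [show ((candles.length : Nat) : Int) = ((candles.map (fun c => PySem.Dict.getD ⟨c⟩ "high" 0)).length : Int) by rw [hlenh],
            pvFractals_eq, hlenh]
        apply List.map_congr_left
        intro i hi
        have hi' : i < candles.length := List.mem_range.mp hi
        by_cases hc : half ≤ (i : Int) ∧ (i : Int) < (candles.length : Int) - half
        · rw [if_pos (by omega), pvUpA_eq candles half i hc.1 hc.2,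
              decide_eq_true hc.1, decide_eq_true hc.2, Bool.and_true, Bool.and_true]
        · rw [if_neg (by omega)]
          rcases not_and_or.mp hc with h | h
          · rw [decide_eq_false h, Bool.and_false, Bool.false_and]
          · rw [decide_eq_false h, Bool.and_false]
      · rw [show ((candles.length : Nat) : Int) = ((candles.map (fun c => -(PySem.Dict.getD ⟨c⟩ "low" 0))).length : Int) by rw [hlenl],
            pvFractals_eq, hlenl]
        apply List.map_congr_left
        intro i hi
        have hi' : i < candles.length := List.mem_range.mp hi
        by_cases hc : half ≤ (i : Int) ∧ (i : Int) < (candles.length : Int) - half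
        · rw [if_pos (by omega), pvDownA_eq candles half i hc.1 hc.2,
              decide_eq_true hc.1, decide_eq_true hc.2, Bool.and_true, Bool.and_true]
        · rw [if_neg (by omega)]
          rcases not_and_or.mp hc with h | h
          · rw [decide_eq_false h, Bool.and_false, Bool.false_and]
          · rw [decide_eq_false h, Bool.and_false]

-- ===== VERDICT (by name: the statement is the Claim_ definition above) =====
theorem fractal_indicator_spec : Claim_equal_fractal_indicator := by
  intro candles period _hdom hpre
  unfold Spec_fractal_indicator
  exact pvMain candles period hpre.1
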